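-- pv_equiv track=rewrite | github.com/am-berry/advent-of-code | 2019/day4.py | password_count
-- ===== SOURCE A (Python) =====
-- def is_ascending(x):
--   a = [int(i) for i in str(x)]
--   for x in range(0, len(a)-1):
--     if a[x] > a[x+1]:
--       return False
--   return True
--
-- def is_double(x):
--   a = [int(i) for i in str(x)]
--   for x in range(0, len(a)-1):
--     if a[x] == a[x+1]:
--       return True
--   return False
--
-- def password_count(x, y):
--   cnt = 0
--   num_list = []
--   for i in range(x, y):
--     if is_ascending(i) and is_double(i):
--       num_list.append(i)
--       cnt += 1
--   return cnt, num_list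
-- ===== SOURCE B (Python) =====
-- def check(n):
--     # one right-to-left arithmetic pass: non-decreasing digits and an adjacent double
--     prev = n % 10
--     n //= 10
--     double = False
--     while n > 0:
--         d = n % 10
--         if d > prev:
--             return False
--         if d == prev:
--             double = True
--         prev = d
--         n //= 10
--     return double
--
-- def password_count(x, y):
--     num_list = [i for i in range(x, y) if check(i)]
--     return len(num_list), num_list
-- ===== Notes on version B (the rewrite author's own statement) =====
-- stated objective: faster
-- what changed: Per-number check replaced by a single right-to-left arithmetic digit pass (mod/floordiv) that fuses the ascending and double tests instead of building a digit list from str(i) and scanning it twice by index, and the outer counter loop became a filter comprehension with len.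
import Mathlib
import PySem

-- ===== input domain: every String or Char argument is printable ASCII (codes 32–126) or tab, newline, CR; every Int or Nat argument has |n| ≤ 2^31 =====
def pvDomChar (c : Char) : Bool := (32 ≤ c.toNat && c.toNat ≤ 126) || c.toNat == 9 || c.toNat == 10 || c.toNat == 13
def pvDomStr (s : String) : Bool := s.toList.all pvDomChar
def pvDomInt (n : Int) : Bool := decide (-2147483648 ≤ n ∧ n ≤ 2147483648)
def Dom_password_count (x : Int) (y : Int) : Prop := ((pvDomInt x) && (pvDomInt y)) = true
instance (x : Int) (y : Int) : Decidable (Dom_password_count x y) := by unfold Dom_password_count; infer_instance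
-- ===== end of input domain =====

-- B replaces A's per-number str(i)-based double index scan by a single right-to-left
-- arithmetic digit pass and builds the result list by filtering the range (faster by a constant factor).


-- ===== PORT A =====
-- a = [int(i) for i in str(x)] ; under Pre_ every number in the range is ≥ 0, so every
-- character of str(x) is a digit and ofChars? never returns none: getD 0 is unreachable there.
def pvDigitsA (x : Int) : List Int :=
  (PySem.Int.toChars x).map (fun c => (PySem.Int.ofChars? [c]).getD 0)

-- 'for x in range(0, len(a)-1): if a[x] > a[x+1]: return False / return True'
-- (the indices are always in range, so pyGetD is exact there)
def pv_is_ascending (x : Int) : Bool :=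
  let a := pvDigitsA x
  (PySem.List.pyRange 0 ((a.length : Int) - 1) 1).all
    (fun t => !decide (PySem.List.pyGetD a t 0 > PySem.List.pyGetD a (t + 1) 0))

def pv_is_double (x : Int) : Bool :=
  let a := pvDigitsA x
  (PySem.List.pyRange 0 ((a.length : Int) - 1) 1).any
    (fun t => decide (PySem.List.pyGetD a t 0 = PySem.List.pyGetD a (t + 1) 0))

def password_count (x : Int) (y : Int) : Int × List Int :=
  (PySem.List.pyRange x y 1).foldl
    (fun st i => if pv_is_ascending i && pv_is_double i then (st.1 + 1, st.2 ++ [i]) else st)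
    (0, [])

-- ===== PORT B =====
-- the 'while n > 0' loop of check(): prev digit, double flag
def pvBLoop (n : Int) (prev : Int) (double : Bool) : Bool :=
  if _h : 0 < n then
    let d := PySem.Int.mod n 10
    if d > prev then false
    else pvBLoop (PySem.Int.floordiv n 10) d (double || (d == prev))
  else double
termination_by n.toNat
decreasing_by
  have h2 : PySem.Int.floordiv n 10 = n / 10 := PySem.Int.floordiv_eq_ediv_of_pos (by norm_num)
  rw [h2]; omega

def pvCheck (n : Int) : Bool :=
  pvBLoop (PySem.Int.floordiv n 10) (PySem.Int.mod n 10) false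

def password_count_alt (x : Int) (y : Int) : Int × List Int :=
  let l := (PySem.List.pyRange x y 1).filter pvCheck
  ((l.length : Int), l)

-- ===== PRECONDITION & SPEC =====
-- Pre_ excludes exactly the inputs where A raises: a nonempty range starting below 0
-- makes is_ascending call int('-') on the sign of str(i), a ValueError.
def Pre_password_count (x : Int) (y : Int) : Prop := 0 ≤ x ∨ y ≤ x
instance (x : Int) (y : Int) : Decidable (Pre_password_count x y) := by
  unfold Pre_password_count; infer_instance

def pvWitness_password_count : Int × Int := (100, 140)

def Spec_password_count (x : Int) (y : Int) (out : Int × List Int) : Prop :=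
  out = password_count_alt x y
instance (x : Int) (y : Int) (out : Int × List Int) : Decidable (Spec_password_count x y out) := by
  unfold Spec_password_count; infer_instance

-- ===== CLAIM (what is proved, stated in full; the proofs are below) =====
def Claim_equal_password_count : Prop :=
  ∀ (x : Int) (y : Int), Dom_password_count x y → Pre_password_count x y →
    Spec_password_count x y (password_count x y)

-- ===== LEMMAS AND PROOFS =====

-- int(c) of a decimal digit character
lemma pv_ofChars_digitChar (d : Nat) (hd : d < 10) :
    (PySem.Int.ofChars? [Nat.digitChar d]).getD 0 = (d : Int) := by
  interval_cases d <;> decide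

-- Nat.toDigits via Nat.digits (enough fuel)
lemma pv_toDigitsCore_eq (fuel : Nat) :
    ∀ (n : Nat) (ds : List Char), n < fuel → 0 < n →
    Nat.toDigitsCore 10 fuel n ds = ((Nat.digits 10 n).reverse.map Nat.digitChar) ++ ds := by
  induction fuel with
  | zero => intro n ds h; omega
  | succ f ih =>
    intro n ds h hn
    rw [Nat.toDigitsCore]
    have hdig : Nat.digits 10 n = n % 10 :: Nat.digits 10 (n / 10) :=
      Nat.digits_def' (by norm_num) hn
    by_cases h0 : n / 10 = 0
    · simp [h0, hdig, Nat.digits_zero]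
    · have hlt : n / 10 < f := by
        have := Nat.div_lt_self hn (by norm_num : 1 < 10); omega
      simp only [h0, if_false]
      rw [ih (n / 10) _ hlt (Nat.pos_of_ne_zero h0), hdig]
      simp

lemma pv_toChars_pos (m : Nat) (hm : 0 < m) :
    PySem.Int.toChars (m : Int) = (Nat.digits 10 m).reverse.map Nat.digitChar := by
  rw [PySem.Int.toChars]
  have : ¬ ((m : Int) < 0) := by omega
  rw [if_neg this]
  have : ((m : Int)).toNat = m := by omega
  rw [this, Nat.toDigits]
  rw [pv_toDigitsCore_eq (m + 1) m [] (by omega) hm]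
  simp

lemma pv_digitsA_eq (m : Nat) (hm : 0 < m) :
    pvDigitsA (m : Int) = (Nat.digits 10 m).reverse.map (fun (d : Nat) => (d : Int)) := by
  rw [pvDigitsA, pv_toChars_pos m hm, List.map_map]
  apply List.map_congr_left
  intro d hd
  have : d < 10 := Nat.digits_lt_base (by norm_num) (List.mem_reverse.mp hd)
  exact pv_ofChars_digitChar d this

-- the index range 0 .. len(a)-1 as Nat indices
lemma pv_pyRange_len_pred (n : Nat) :
    PySem.List.pyRange 0 ((n : Int) - 1) 1 = (List.range (n - 1)).map (fun (t : Nat) => (t : Int)) := by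
  have h : ((n : Int) - 1).toNat = n - 1 := by omega
  rw [PySem.List.pyRange_zero, h]

-- A's index loop for ascending = IsChain (≤)
lemma pv_asc_chain (a : List Int) :
    ((List.range (a.length - 1)).all
      (fun t => !decide (a.getD t 0 > a.getD (t + 1) 0)) = true)
    ↔ List.IsChain (· ≤ ·) a := by
  induction a with
  | nil => simp
  | cons x tl ih =>
    cases tl with
    | nil => simp
    | cons y tl' =>
      have hlen : (x :: y :: tl').length - 1 = ((y :: tl').length - 1) + 1 := by
        simp [List.length_cons]
      rw [hlen, List.range_succ_eq_map]
      simp only [List.all_cons, List.all_map, Bool.and_eq_true, List.isChain_cons_cons]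
      constructor
      · rintro ⟨h0, hrest⟩
        refine ⟨by simpa using h0, ih.mp ?_⟩
        rw [List.all_eq_true] at hrest ⊢
        intro t ht
        have := hrest t ht
        simpa [Function.comp, Nat.succ_eq_add_one, List.getD_cons_succ] using this
      · rintro ⟨hxy, hchain⟩
        refine ⟨by simpa using hxy, ?_⟩
        rw [List.all_eq_true]
        intro t ht
        have := (List.all_eq_true.mp (ih.mpr hchain)) t ht
        simpa [Function.comp, Nat.succ_eq_add_one, List.getD_cons_succ] using this

-- A's index loop for a double = ¬ IsChain (≠)
lemma pv_dbl_chain (a : List Int) :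
    ((List.range (a.length - 1)).any
      (fun t => decide (a.getD t 0 = a.getD (t + 1) 0)) = true)
    ↔ ¬ List.IsChain (· ≠ ·) a := by
  induction a with
  | nil => simp
  | cons x tl ih =>
    cases tl with
    | nil => simp
    | cons y tl' =>
      have hlen : (x :: y :: tl').length - 1 = ((y :: tl').length - 1) + 1 := by
        simp [List.length_cons]
      rw [hlen, List.range_succ_eq_map]
      simp only [List.any_cons, List.any_map, Bool.or_eq_true, List.isChain_cons_cons]
      constructor
      · rintro (h0 | hrest)
        · intro hc; exact hc.1 (by simpa using h0)
        · intro hc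
          apply ih.mp _ hc.2
          rw [List.any_eq_true] at hrest ⊢
          obtain ⟨t, ht, hh⟩ := hrest
          exact ⟨t, ht, by simpa [Function.comp, Nat.succ_eq_add_one, List.getD_cons_succ] using hh⟩
      · intro hn
        by_cases hxy : x = y
        · left; simpa using hxy
        · right
          have : ¬ List.IsChain (· ≠ ·) (y :: tl') := fun hc => hn ⟨hxy, hc⟩
          have := ih.mpr this
          rw [List.any_eq_true] at this ⊢
          obtain ⟨t, ht, hh⟩ := this
          exact ⟨t, ht, by simpa [Function.comp, Nat.succ_eq_add_one, List.getD_cons_succ] using hh⟩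

lemma pv_pyGetD_succ (a : List Int) (t : Nat) :
    PySem.List.pyGetD a ((t : Int) + 1) 0 = a.getD (t + 1) 0 := by
  rw [show ((t : Int) + 1) = ((t + 1 : Nat) : Int) by push_cast; ring]
  exact PySem.List.pyGetD_natCast a (t + 1) 0

lemma pv_is_ascending_iff (i : Int) :
    pv_is_ascending i = true ↔ List.IsChain (· ≤ ·) (pvDigitsA i) := by
  rw [pv_is_ascending]
  rw [pv_pyRange_len_pred (pvDigitsA i).length, List.all_map]
  rw [← pv_asc_chain (pvDigitsA i)]
  constructor <;> intro h <;> rw [List.all_eq_true] at h ⊢ <;> intro t ht <;>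
    have := h t ht <;>
    simpa [Function.comp, PySem.List.pyGetD_natCast, pv_pyGetD_succ] using this

lemma pv_is_double_iff (i : Int) :
    pv_is_double i = true ↔ ¬ List.IsChain (· ≠ ·) (pvDigitsA i) := by
  rw [pv_is_double]
  rw [pv_pyRange_len_pred (pvDigitsA i).length, List.any_map]
  rw [← pv_dbl_chain (pvDigitsA i)]
  constructor <;> intro h <;> rw [List.any_eq_true] at h ⊢ <;>
    obtain ⟨t, ht, hh⟩ := h <;>
    exact ⟨t, ht, by simpa [Function.comp, PySem.List.pyGetD_natCast, pv_pyGetD_succ] using hh⟩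

-- B's loop over the little-endian digits of its argument
lemma pv_bLoop_iff (r : Nat) : ∀ (p : Int) (b : Bool),
    pvBLoop (r : Int) p b = true ↔
      (List.IsChain (· ≥ ·) (p :: (Nat.digits 10 r).map (fun (d : Nat) => (d : Int))) ∧
       (b = true ∨ ¬ List.IsChain (· ≠ ·) (p :: (Nat.digits 10 r).map (fun (d : Nat) => (d : Int))))) := by
  induction r using Nat.strong_induction_on with
  | _ r ih =>
    intro p b
    rw [pvBLoop]
    by_cases hr : 0 < r
    · have hpos : (0 : Int) < (r : Int) := by exact_mod_cast hr
      rw [dif_pos hpos]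
      have hmod : PySem.Int.mod (r : Int) 10 = ((r % 10 : Nat) : Int) :=
        PySem.Int.mod_natCast r 10
      have hdiv : PySem.Int.floordiv (r : Int) 10 = ((r / 10 : Nat) : Int) :=
        PySem.Int.floordiv_natCast r 10
      have hdig : Nat.digits 10 r = r % 10 :: Nat.digits 10 (r / 10) :=
        Nat.digits_def' (by norm_num) hr
      rw [hdig]
      simp only [List.map_cons, List.isChain_cons_cons, hmod, hdiv]
      by_cases hgt : ((r % 10 : Nat) : Int) > p
      · rw [if_pos hgt]
        simp only [Bool.false_eq_true, false_iff]
        rintro ⟨⟨hge, _⟩, _⟩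
        omega
      · rw [if_neg hgt]
        rw [ih (r / 10) (Nat.div_lt_self hr (by norm_num)) _ _]
        constructor
        · rintro ⟨hc, hd⟩
          refine ⟨⟨by omega, hc⟩, ?_⟩
          rcases hd with hd | hd
          · rcases Bool.or_eq_true _ _ |>.mp hd with hb | he
            · exact Or.inl hb
            · right; rintro ⟨hne, _⟩
              exact hne (by have := beq_iff_eq.mp he; omega)
          · right; rintro ⟨_, hc2⟩; exact hd hc2
        · rintro ⟨⟨_, hc⟩, hd⟩
          refine ⟨hc, ?_⟩
          rcases hd with hb | hnd
          · exact Or.inl (by simp [hb])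
          · by_cases hpe : p = ((r % 10 : Nat) : Int)
            · left; simp [hpe.symm]
            · right; intro hc2; exact hnd ⟨hpe, hc2⟩
    · have : ¬ ((0 : Int) < (r : Int)) := by exact_mod_cast hr
      rw [dif_neg this]
      have hr0 : r = 0 := by omega
      subst hr0
      simp

-- a number whose value floordiv 10 is ≤ 0 never enters B's loop
lemma pv_check_small (n : Int) (h : PySem.Int.floordiv n 10 ≤ 0) : pvCheck n = false := by
  rw [pvCheck, pvBLoop, dif_neg (by omega)]

-- the two per-number tests agree on nonnegative numbers
lemma pv_check_eq (m : Nat) :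
    (pv_is_ascending (m : Int) && pv_is_double (m : Int)) = pvCheck (m : Int) := by
  by_cases hm : 0 < m
  · have hdig : Nat.digits 10 m = m % 10 :: Nat.digits 10 (m / 10) :=
      Nat.digits_def' (by norm_num) hm
    have hA := pv_digitsA_eq m hm
    have hrev : pvDigitsA (m : Int)
        = ((Nat.digits 10 m).map (fun (d : Nat) => (d : Int))).reverse := by
      rw [hA, List.map_reverse]
    rw [Bool.eq_iff_iff, Bool.and_eq_true]
    rw [pv_is_ascending_iff, pv_is_double_iff, hrev]
    rw [List.isChain_reverse, List.isChain_reverse]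
    have hflip1 : (List.IsChain (fun a b => (b : Int) ≤ a)
        ((Nat.digits 10 m).map (fun (d : Nat) => (d : Int))))
        ↔ List.IsChain (· ≥ ·) ((Nat.digits 10 m).map (fun (d : Nat) => (d : Int))) := Iff.rfl
    have hflip2 : (List.IsChain (fun a b => (b : Int) ≠ a)
        ((Nat.digits 10 m).map (fun (d : Nat) => (d : Int))))
        ↔ List.IsChain (· ≠ ·) ((Nat.digits 10 m).map (fun (d : Nat) => (d : Int))) := by
      constructor <;> exact fun h => h.imp fun _ _ hab => Ne.symm hab
    rw [hflip1, hflip2]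
    rw [pvCheck]
    have hmod : PySem.Int.mod (m : Int) 10 = ((m % 10 : Nat) : Int) :=
      PySem.Int.mod_natCast m 10
    have hdiv : PySem.Int.floordiv (m : Int) 10 = ((m / 10 : Nat) : Int) :=
      PySem.Int.floordiv_natCast m 10
    rw [hmod, hdiv, pv_bLoop_iff (m / 10) _ false]
    rw [hdig]
    simp
  · have hm0 : m = 0 := by omega
    subst hm0
    have hB : pvCheck ((0 : Nat) : Int) = false := pv_check_small 0 (by decide)
    have hA : pv_is_double ((0 : Nat) : Int) = false := by decide
    rw [hA, hB, Bool.and_false]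

-- A's counting fold = (length of filter, filter), for any predicate
lemma pv_foldl_filter (p : Int → Bool) (l : List Int) :
    ∀ (c : Int) (acc : List Int),
    l.foldl (fun st i => if p i then (st.1 + 1, st.2 ++ [i]) else st) (c, acc)
      = (c + ((l.filter p).length : Int), acc ++ l.filter p) := by
  induction l with
  | nil => intro c acc; simp
  | cons hd tl ih =>
    intro c acc
    by_cases hp : p hd
    · simp only [List.foldl_cons, hp, if_pos, List.filter_cons_of_pos hp]
      rw [ih]
      simp only [Prod.mk.injEq, List.length_cons, List.append_assoc, List.singleton_append]
      refine ⟨by push_cast; ring, by simp⟩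
    · rw [List.foldl_cons, if_neg hp, List.filter_cons_of_neg (by simp [hp]), ih]

-- ===== VERDICT (by name: the statement is the Claim_ definition above) =====
theorem password_count_spec : Claim_equal_password_count := by
  intro x y _ hpre
  unfold Spec_password_count password_count password_count_alt
  by_cases hle : y ≤ x
  · rw [PySem.List.pyRange_one_eq_nil hle]; simp
  · have hx : 0 ≤ x := by
      rcases hpre with h | h
      · exact h
      · omega
    rw [pv_foldl_filter _ _ 0 []]
    have hfc : (PySem.List.pyRange x y 1).filter
        (fun i => pv_is_ascending i && pv_is_double i)
        = (PySem.List.pyRange x y 1).filter pvCheck := by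
      apply List.filter_congr
      intro i hi
      have hmem := (PySem.List.mem_pyRange_one).mp hi
      have h0i : 0 ≤ i := by omega
      have : i = ((i.toNat : Nat) : Int) := by omega
      rw [this]
      exact pv_check_eq i.toNat
    rw [hfc]
    simp
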